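-- pv_equiv track=rewrite | github.com/orenmazor/advent-of-code-2022 | advent_of_code_2022/day2part2.py | find_needed_hand
-- ===== SOURCE A (Python) =====
-- from typing import Tuple
--
-- def find_needed_hand(normalized_hand: Tuple[str, str]) -> str:
--     """Receive a normalized hand and find out which hand won."""
--     win_over = {"Rock": "Paper", "Paper": "Scissors", "Scissors": "Rock"}
--     lose_to = {v: k for k, v in win_over.items()}
--
--     if normalized_hand[1] == "Draw":
--         return normalized_hand[0]
--
--     if normalized_hand[1] == "Win":
--         return win_over[normalized_hand[0]]
--
--     if normalized_hand[1] == "Lose":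
--         return lose_to[normalized_hand[0]]
--
--     # leave this here on purpose to make logic errors clearer
--     raise Exception("how did you get here.")
-- ===== SOURCE B (Python) =====
-- def find_needed_hand(normalized_hand):
--     """Receive a normalized hand and find out which hand won."""
--     opponent, outcome = normalized_hand
--     if outcome == "Draw":
--         return opponent
--     if outcome not in ("Win", "Lose"):
--         # leave this here on purpose to make logic errors clearer
--         raise Exception("how did you get here.")
--     beats = {("Rock", "Scissors"), ("Paper", "Rock"), ("Scissors", "Paper")}
--     for mine in ("Rock", "Paper", "Scissors"):
--         wins = (mine, opponent) in beats if outcome == "Win" else (opponent, mine) in beats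
--         if wins:
--             return mine
--     raise KeyError(opponent)
-- ===== Notes on version B (the rewrite author's own statement) =====
-- stated objective: alternative
-- what changed: Replaces A's two hand-written lookup tables by game simulation: a 'beats' relation plus a linear search over candidate hands, returning the first candidate whose simulated result against the opponent matches the requested outcome.
import Mathlib
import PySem

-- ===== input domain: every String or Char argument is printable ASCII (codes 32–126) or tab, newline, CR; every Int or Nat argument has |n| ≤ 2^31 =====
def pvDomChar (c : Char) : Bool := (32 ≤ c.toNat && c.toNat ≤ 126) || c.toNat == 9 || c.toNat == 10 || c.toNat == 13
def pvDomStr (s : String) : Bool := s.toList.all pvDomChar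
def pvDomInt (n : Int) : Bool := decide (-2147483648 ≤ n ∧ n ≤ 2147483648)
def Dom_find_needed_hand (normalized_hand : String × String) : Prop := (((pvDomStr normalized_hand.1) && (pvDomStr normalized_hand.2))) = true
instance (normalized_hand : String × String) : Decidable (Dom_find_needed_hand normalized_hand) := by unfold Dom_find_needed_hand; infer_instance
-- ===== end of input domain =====

-- B replaces A's two lookup tables by game simulation: a 'beats' relation and a linear
-- search over candidate hands for the one producing the requested outcome (alternative; same cost).

-- ===== PORT A =====
def find_needed_hand (normalized_hand : String × String) : String :=
  let win_over : PySem.Dict String String :=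
    ((PySem.Dict.empty).insert "Rock" "Paper" |>.insert "Paper" "Scissors" |>.insert "Scissors" "Rock")
  let lose_to : PySem.Dict String String :=
    win_over.items.foldl (fun d kv => d.insert kv.2 kv.1) PySem.Dict.empty
  if normalized_hand.2 = "Draw" then normalized_hand.1
  else if normalized_hand.2 = "Win" then (win_over.get? normalized_hand.1).getD ""
  else if normalized_hand.2 = "Lose" then (lose_to.get? normalized_hand.1).getD ""
  else ""  -- A raises Exception here (and KeyError on unknown hands); excluded by Pre_

-- ===== PORT B =====
-- the 'beats' set (Python set literal of pairs)
def fnh_beats : List (String × String) :=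
  PySem.Set.ofList [("Rock", "Scissors"), ("Paper", "Rock"), ("Scissors", "Paper")]

-- the 'for mine in (…)' search loop of Source B
def fnh_search (opponent outcome : String) : List String → Option String
  | [] => none  -- loop falls through: Source B raises KeyError; excluded by Pre_
  | mine :: rest =>
    let wins : Bool :=
      if outcome = "Win" then decide ((mine, opponent) ∈ fnh_beats)
      else decide ((opponent, mine) ∈ fnh_beats)
    if wins then some mine else fnh_search opponent outcome rest

def find_needed_hand_alt (normalized_hand : String × String) : String :=
  let opponent := normalized_hand.1
  let outcome := normalized_hand.2
  if outcome = "Draw" then opponent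
  else if ¬(outcome = "Win" ∨ outcome = "Lose") then ""  -- Source B raises Exception here; excluded by Pre_
  else (fnh_search opponent outcome ["Rock", "Paper", "Scissors"]).getD ""

-- ===== PRECONDITION & SPEC =====
-- Pre_ excludes exactly the inputs on which A raises: an outcome other than Draw/Win/Lose
-- (explicit Exception), or Win/Lose with a hand outside Rock/Paper/Scissors (KeyError).
def Pre_find_needed_hand (normalized_hand : String × String) : Prop :=
  normalized_hand.2 = "Draw" ∨
  ((normalized_hand.2 = "Win" ∨ normalized_hand.2 = "Lose") ∧
   (normalized_hand.1 = "Rock" ∨ normalized_hand.1 = "Paper" ∨ normalized_hand.1 = "Scissors"))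
instance (normalized_hand : String × String) : Decidable (Pre_find_needed_hand normalized_hand) := by unfold Pre_find_needed_hand; infer_instance
def pvWitness_find_needed_hand : (String × String) := ("Rock", "Win")

def Spec_find_needed_hand (normalized_hand : String × String) (out : String) : Prop := out = find_needed_hand_alt normalized_hand
instance (normalized_hand : String × String) (out : String) : Decidable (Spec_find_needed_hand normalized_hand out) := by unfold Spec_find_needed_hand; infer_instance

-- ===== CLAIM =====
def Claim_equal_find_needed_hand : Prop := ∀ (normalized_hand : String × String), Dom_find_needed_hand normalized_hand → Pre_find_needed_hand normalized_hand → Spec_find_needed_hand normalized_hand (find_needed_hand normalized_hand)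

-- ===== LEMMAS AND PROOFS =====

-- ===== VERDICT =====
theorem find_needed_hand_spec : Claim_equal_find_needed_hand := by
  rintro ⟨h, o⟩ _ (hd | ⟨(hw | hl), (hh | hh | hh)⟩) <;> subst_vars <;> rfl
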